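-- pv_equiv track=rewrite | github.com/vinayuuuck/ukiepc2023 | boatcommuter.py | calcCharge
-- ===== SOURCE A (Python) =====
-- def calcCharge(boat2d, numcards):
--     charges = {}
--     for i in range(1, numcards+1):
--         charges[i] = [0, 0, 0, 0]
--
--     for event in boat2d:
--         if charges[event[1]][0] == 0:
--             charges[event[1]][0] = event[0]
--             charges[event[1]][1] += 1
--             charges[event[1]][3] = event[0]
--
--         elif charges[event[1]][0] == event[0]:
--             charges[event[1]][2] += 100
--             charges[event[1]][1] += 1
--             charges[event[1]][0] = 0 if (charges[event[1]][1] % 2 == 0) else event[0]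
--
--         elif charges[event[1]][0] != event[0]:
--             charges[event[1]][1] += 1
--
--             if event[0] == charges[event[1]][3]:
--                 charges[event[1]][2] += 100
--             else:
--                 charges[event[1]][2] += abs(charges[event[1]][0] - event[0])
--
--             charges[event[1]][0] = event[0]
--
--     for charge in charges:
--         if charges[charge][1] == 1:
--             charges[charge][2] += 100
--
--     return charges
-- ===== SOURCE B (Python) =====
-- def calcCharge(boat2d, numcards):
--     # Group each card's boarding times once, then run the fare state machine
--     # per card with plain local variables (no repeated dict/list indexing).
--     groups = {}
--     for e in boat2d:
--         groups.setdefault(e[1], []).append(e[0])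
--     return {i: _card(groups.get(i, [])) for i in range(1, numcards + 1)}
--
--
-- def _card(times):
--     last = count = charge = first = 0
--     for t in times:
--         if last == 0:
--             last = t
--             count += 1
--             first = t
--         elif last == t:
--             count += 1
--             charge += 100
--             last = 0 if count % 2 == 0 else t
--         else:
--             count += 1
--             charge += 100 if t == first else abs(last - t)
--             last = t
--     if count == 1:
--         charge += 100
--     return [last, count, charge, first]
-- ===== Notes on version B (the rewrite author's own statement) =====
-- stated objective: alternative
-- what changed: Replaces A's single interleaved scan that mutates a dict of 4-element state lists per event with an index-then-per-card pass: one grouping pass builds each card's ordered list of boarding times, then each card's fare is computed independently by a scalar state machine whose final count==1 surcharge is folded into the per-card pass instead of A's separate finishing loop over the dict.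
import Mathlib
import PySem

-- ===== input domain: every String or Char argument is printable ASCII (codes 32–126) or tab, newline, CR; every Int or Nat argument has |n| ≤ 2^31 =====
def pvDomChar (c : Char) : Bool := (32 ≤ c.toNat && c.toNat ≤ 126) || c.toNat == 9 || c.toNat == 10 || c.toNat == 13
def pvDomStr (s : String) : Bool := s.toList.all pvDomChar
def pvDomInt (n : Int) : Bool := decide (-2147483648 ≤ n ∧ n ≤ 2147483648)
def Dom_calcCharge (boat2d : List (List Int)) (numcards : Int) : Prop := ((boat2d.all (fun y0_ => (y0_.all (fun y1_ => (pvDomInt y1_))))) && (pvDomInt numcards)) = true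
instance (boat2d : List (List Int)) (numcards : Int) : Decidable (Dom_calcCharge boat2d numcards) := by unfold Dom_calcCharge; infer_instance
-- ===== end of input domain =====

-- B replaces A's interleaved dict-mutating scan by a group-by-card pass followed by an
-- independent scalar state machine per card (alternative decomposition, same cost).

-- ===== PORT A =====
-- the body of A's event loop acting on one card's state list [last, count, charge, first]
-- (event indexing e[0]/e[1] is via pyGetD: exact under Pre_, which guarantees length ≥ 2)
def stepEntry (st : List Int) (t : Int) : List Int :=
  if PySem.List.pyGetD st 0 0 == 0 then
    let st1 := PySem.List.pySetD st 0 t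
    let st2 := PySem.List.pySetD st1 1 (PySem.List.pyGetD st1 1 0 + 1)
    PySem.List.pySetD st2 3 t
  else if PySem.List.pyGetD st 0 0 == t then
    let st1 := PySem.List.pySetD st 2 (PySem.List.pyGetD st 2 0 + 100)
    let st2 := PySem.List.pySetD st1 1 (PySem.List.pyGetD st1 1 0 + 1)
    PySem.List.pySetD st2 0 (if PySem.Int.mod (PySem.List.pyGetD st2 1 0) 2 == 0 then 0 else t)
  else  -- the final 'elif charges[event[1]][0] != event[0]' is the negation of the second test
    let st1 := PySem.List.pySetD st 1 (PySem.List.pyGetD st 1 0 + 1)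
    let st2 := if t == PySem.List.pyGetD st1 3 0 then PySem.List.pySetD st1 2 (PySem.List.pyGetD st1 2 0 + 100)
               else PySem.List.pySetD st1 2 (PySem.List.pyGetD st1 2 0 + |PySem.List.pyGetD st1 0 0 - t|)
    PySem.List.pySetD st2 0 t

-- body of A's final loop ('+100 if the card was used exactly once')
def finEntry (st : List Int) : List Int :=
  if PySem.List.pyGetD st 1 0 == 1 then PySem.List.pySetD st 2 (PySem.List.pyGetD st 2 0 + 100) else st

-- one iteration of A's event loop: look up the event's card, apply the body, store back
def stepA (d : PySem.Dict Int (List Int)) (e : List Int) : PySem.Dict Int (List Int) :=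
  match d.get? (PySem.List.pyGetD e 1 0) with
  | none => d          -- Python raises KeyError here; excluded by Pre_
  | some st => d.insert (PySem.List.pyGetD e 1 0) (stepEntry st (PySem.List.pyGetD e 0 0))

-- one iteration of A's final loop over the dict's keys
def finA (d : PySem.Dict Int (List Int)) (k : Int) : PySem.Dict Int (List Int) :=
  match d.get? k with
  | none => d
  | some st => d.insert k (finEntry st)

def calcCharge (boat2d : List (List Int)) (numcards : Int) : List (Int × List Int) :=
  let d0 := (PySem.List.pyRange 1 (numcards + 1) 1).foldl
      (fun d i => d.insert i ([0, 0, 0, 0] : List Int)) PySem.Dict.empty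
  let d1 := boat2d.foldl stepA d0
  let d2 := d1.keys.foldl finA d1
  d2.items

-- ===== PORT B =====
-- the scalar state machine of Source B's _card, state (last, count, charge, first)
def tupStep (s : Int × Int × Int × Int) (t : Int) : Int × Int × Int × Int :=
  match s with
  | (last, count, charge, first) =>
    if last == 0 then (t, count + 1, charge, t)
    else if last == t then
      ((if PySem.Int.mod (count + 1) 2 == 0 then 0 else t), count + 1, charge + 100, first)
    else
      (t, count + 1, charge + (if t == first then 100 else |last - t|), first)

def cardRun (ts : List Int) : List Int :=
  match ts.foldl tupStep (0, 0, 0, 0) with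
  | (last, count, charge, first) =>
    [last, count, if count == 1 then charge + 100 else charge, first]

def calcCharge_alt (boat2d : List (List Int)) (numcards : Int) : List (Int × List Int) :=
  let groups := boat2d.foldl
      (fun d e => d.modify (PySem.List.pyGetD e 1 0) [] (· ++ [PySem.List.pyGetD e 0 0])) PySem.Dict.empty
  (PySem.List.pyRange 1 (numcards + 1) 1).map (fun i => (i, cardRun (groups.getD i [])))

-- ===== PRECONDITION & SPEC =====
-- Pre_ excludes exactly the inputs on which A raises: an event shorter than 2 entries
-- (IndexError on event[1]) or a card id outside 1..numcards (KeyError).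
def Pre_calcCharge (boat2d : List (List Int)) (numcards : Int) : Prop :=
  ∀ e ∈ boat2d, 2 ≤ e.length ∧ 1 ≤ PySem.List.pyGetD e 1 0 ∧ PySem.List.pyGetD e 1 0 ≤ numcards
instance (boat2d : List (List Int)) (numcards : Int) : Decidable (Pre_calcCharge boat2d numcards) := by
  unfold Pre_calcCharge; infer_instance

def pvWitness_calcCharge : List (List Int) × Int := ([[3, 1], [3, 2], [7, 1]], 2)

def Spec_calcCharge (boat2d : List (List Int)) (numcards : Int) (out : List (Int × List Int)) : Prop := out = calcCharge_alt boat2d numcards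
instance (boat2d : List (List Int)) (numcards : Int) (out : List (Int × List Int)) : Decidable (Spec_calcCharge boat2d numcards out) := by unfold Spec_calcCharge; infer_instance

-- ===== CLAIM (what is proved, stated in full; the proofs are below) =====
def Claim_equal_calcCharge : Prop := ∀ (boat2d : List (List Int)) (numcards : Int), Dom_calcCharge boat2d numcards → Pre_calcCharge boat2d numcards → Spec_calcCharge boat2d numcards (calcCharge boat2d numcards)

-- ===== LEMMAS AND PROOFS =====

-- pyGetD/pySetD on a 4-element state list (kernel-reducible)
lemma pv_pg0 (x y z w v : Int) : PySem.List.pyGetD [x,y,z,w] 0 v = x := rfl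
lemma pv_pg1 (x y z w v : Int) : PySem.List.pyGetD [x,y,z,w] 1 v = y := rfl
lemma pv_pg2 (x y z w v : Int) : PySem.List.pyGetD [x,y,z,w] 2 v = z := rfl
lemma pv_pg3 (x y z w v : Int) : PySem.List.pyGetD [x,y,z,w] 3 v = w := rfl
lemma pv_ps0 (x y z w v : Int) : PySem.List.pySetD [x,y,z,w] 0 v = [v,y,z,w] := rfl
lemma pv_ps1 (x y z w v : Int) : PySem.List.pySetD [x,y,z,w] 1 v = [x,v,z,w] := rfl
lemma pv_ps2 (x y z w v : Int) : PySem.List.pySetD [x,y,z,w] 2 v = [x,y,v,w] := rfl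
lemma pv_ps3 (x y z w v : Int) : PySem.List.pySetD [x,y,z,w] 3 v = [x,y,z,v] := rfl

-- A's per-event body on a 4-list is B's scalar state machine step
lemma stepEntry_tup (a b c d t : Int) :
    stepEntry [a,b,c,d] t =
      (fun s : Int × Int × Int × Int => [s.1, s.2.1, s.2.2.1, s.2.2.2]) (tupStep (a,b,c,d) t) := by
  simp only [stepEntry, tupStep, pv_pg0, pv_ps0, pv_pg1, pv_ps1, pv_pg2, pv_ps2, pv_pg3, pv_ps3]
  split_ifs <;> rfl

lemma finEntry_tup (a b c d : Int) :
    finEntry [a,b,c,d] = [a, b, if b == 1 then c + 100 else c, d] := by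
  simp only [finEntry, pv_pg1, pv_pg2, pv_ps2]
  split_ifs <;> rfl

lemma foldl_stepEntry_tup (ts : List Int) (s : Int × Int × Int × Int) :
    ts.foldl stepEntry [s.1, s.2.1, s.2.2.1, s.2.2.2] =
      (fun s : Int × Int × Int × Int => [s.1, s.2.1, s.2.2.1, s.2.2.2]) (ts.foldl tupStep s) := by
  induction ts generalizing s with
  | nil => rfl
  | cons t ts ih =>
    obtain ⟨a, b, c, d⟩ := s
    simp only [List.foldl_cons, stepEntry_tup a b c d t]
    exact ih (tupStep (a, b, c, d) t)

-- B's per-card routine is: run A's per-event body over the card's times, then A's final pass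
lemma cardRun_eq (ts : List Int) :
    cardRun ts = finEntry (ts.foldl stepEntry [0, 0, 0, 0]) := by
  have h := foldl_stepEntry_tup ts (0, 0, 0, 0)
  simp only [cardRun, h]
  obtain ⟨a, b, c, d⟩ := ts.foldl tupStep (0, 0, 0, 0)
  simp only [finEntry_tup]

lemma keys_foldl_stepA (es : List (List Int)) (d : PySem.Dict Int (List Int)) :
    (es.foldl stepA d).keys = d.keys := by
  induction es generalizing d with
  | nil => rfl
  | cons e es ih =>
    simp only [List.foldl_cons]
    rw [ih]
    unfold stepA
    rcases hg : d.get? (PySem.List.pyGetD e 1 0) with _ | st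
    · rfl
    · have hc : d.contains (PySem.List.pyGetD e 1 0) = true := by
        rw [PySem.Dict.contains_eq_isSome_get?, hg]; rfl
      simp [PySem.Dict.keys_insert_of_contains, hc]

lemma keys_foldl_finA (ks : List Int) (d : PySem.Dict Int (List Int)) :
    (ks.foldl finA d).keys = d.keys := by
  induction ks generalizing d with
  | nil => rfl
  | cons k ks ih =>
    simp only [List.foldl_cons]
    rw [ih]
    unfold finA
    rcases hg : d.get? k with _ | st
    · rfl
    · have hc : d.contains k = true := by
        rw [PySem.Dict.contains_eq_isSome_get?, hg]; rfl
      simp [PySem.Dict.keys_insert_of_contains, hc]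

-- entry of A's event loop at key k = A's body folded over the times of card k
lemma get?_foldl_stepA (es : List (List Int)) (d : PySem.Dict Int (List Int))
    (h : ∀ e ∈ es, (d.get? (PySem.List.pyGetD e 1 0)).isSome) (k : Int) :
    (es.foldl stepA d).get? k =
      Option.map
        (fun st => ((es.filter (fun e => PySem.List.pyGetD e 1 0 == k)).map
            (fun e => PySem.List.pyGetD e 0 0)).foldl stepEntry st)
        (d.get? k) := by
  induction es generalizing d with
  | nil => cases hd : d.get? k <;> simp [hd]
  | cons e es ih =>
    obtain ⟨st0, hst0⟩ := Option.isSome_iff_exists.mp (h e (List.mem_cons_self))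
    have hstep : stepA d e =
        d.insert (PySem.List.pyGetD e 1 0) (stepEntry st0 (PySem.List.pyGetD e 0 0)) := by
      unfold stepA; rw [hst0]
    have h' : ∀ e' ∈ es, ((stepA d e).get? (PySem.List.pyGetD e' 1 0)).isSome := by
      intro e' he'
      rw [hstep, PySem.Dict.get?_insert]
      split_ifs with heq
      · rfl
      · exact h e' (List.mem_cons_of_mem _ he')
    simp only [List.foldl_cons, ih (stepA d e) h']
    rw [hstep, PySem.Dict.get?_insert]
    by_cases hk : k = PySem.List.pyGetD e 1 0
    · subst hk
      simp only [hst0, List.filter_cons, beq_self_eq_true, if_pos, Option.map_some]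
      simp
    · rw [if_neg hk]
      have : (PySem.List.pyGetD e 1 0 == k) = false := by
        simp [Ne.symm hk]
      simp [this]

-- entry of A's final loop at key k
lemma get?_foldl_finA (ks : List Int) (d : PySem.Dict Int (List Int))
    (hnd : ks.Nodup) (h : ∀ j ∈ ks, (d.get? j).isSome) (k : Int) :
    (ks.foldl finA d).get? k =
      if k ∈ ks then Option.map finEntry (d.get? k) else d.get? k := by
  induction ks generalizing d with
  | nil => simp
  | cons j ks ih =>
    obtain ⟨stj, hstj⟩ := Option.isSome_iff_exists.mp (h j (List.mem_cons_self))
    have hstep : finA d j = d.insert j (finEntry stj) := by unfold finA; rw [hstj]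
    have h' : ∀ i ∈ ks, ((finA d j).get? i).isSome := by
      intro i hi
      rw [hstep, PySem.Dict.get?_insert]
      split_ifs with heq
      · rfl
      · exact h i (List.mem_cons_of_mem _ hi)
    simp only [List.foldl_cons, ih (finA d j) (List.Nodup.of_cons hnd) h']
    by_cases hk : k = j
    · subst hk
      have hknot : k ∉ ks := (List.nodup_cons.mp hnd).1
      rw [if_neg hknot, hstep, PySem.Dict.get?_insert_self, hstj]
      simp
    · have : (finA d j).get? k = d.get? k := by
        rw [hstep, PySem.Dict.get?_insert, if_neg hk]
      rw [this]
      simp [List.mem_cons, hk]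

-- the initial dict of A: items, keys, entries
lemma init_items (n : Int) :
    ((PySem.List.pyRange 1 (n + 1) 1).foldl
        (fun d i => d.insert i ([0, 0, 0, 0] : List Int)) PySem.Dict.empty).items =
      (PySem.List.pyRange 1 (n + 1) 1).map (fun i => (i, ([0, 0, 0, 0] : List Int))) := by
  have := PySem.Dict.items_foldl_insert_fresh (d := (PySem.Dict.empty : PySem.Dict Int (List Int)))
      (l := PySem.List.pyRange 1 (n + 1) 1) (k := fun i => i) (v := fun _ => ([0, 0, 0, 0] : List Int))
      (by intro a _; simp) (by simpa using PySem.List.nodup_pyRange_one 1 (n + 1))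
  simpa using this

-- the grouping loop of B: the list collected for card k
lemma groups_getD (es : List (List Int)) (d : PySem.Dict Int (List Int)) (k : Int) :
    (es.foldl (fun d e =>
        d.modify (PySem.List.pyGetD e 1 0) [] (· ++ [PySem.List.pyGetD e 0 0])) d).getD k [] =
      d.getD k [] ++ ((es.filter (fun e => PySem.List.pyGetD e 1 0 == k)).map
        (fun e => PySem.List.pyGetD e 0 0)) := by
  induction es generalizing d with
  | nil => simp
  | cons e es ih =>
    simp only [List.foldl_cons, ih]
    rw [PySem.Dict.getD_modify]
    by_cases hk : k = PySem.List.pyGetD e 1 0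
    · subst hk
      simp
    · have : (PySem.List.pyGetD e 1 0 == k) = false := by simp [Ne.symm hk]
      simp [if_neg hk, this]

-- ===== VERDICT (by name: the statement is the Claim_ definition above) =====
theorem calcCharge_spec : Claim_equal_calcCharge := by
  intro boat2d numcards _ hpre
  simp only [Spec_calcCharge, calcCharge, calcCharge_alt]
  set R := PySem.List.pyRange 1 (numcards + 1) 1 with hRdef
  set d0 := R.foldl (fun d i => d.insert i ([0, 0, 0, 0] : List Int)) PySem.Dict.empty with hd0
  set d1 := boat2d.foldl stepA d0 with hd1
  have hitems0 : d0.items = R.map (fun i => (i, ([0, 0, 0, 0] : List Int))) := init_items numcards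
  have hkeys0 : d0.keys = R := by
    simp only [PySem.Dict.keys, hitems0, List.map_map]
    change R.map (fun i => i) = R
    simp
  have hndR : R.Nodup := by
    rw [hRdef]; exact PySem.List.nodup_pyRange_one 1 (numcards + 1)
  have hnd0 : d0.keys.Nodup := by rw [hkeys0]; exact hndR
  have hget0 : ∀ k ∈ R, d0.get? k = some [0, 0, 0, 0] := by
    intro k hk
    have hmem : (k, ([0, 0, 0, 0] : List Int)) ∈ d0.items := by
      rw [hitems0]; exact List.mem_map.mpr ⟨k, hk, rfl⟩
    exact PySem.Dict.get?_of_mem_items d0 hmem hnd0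
  have hpres : ∀ e ∈ boat2d, (d0.get? (PySem.List.pyGetD e 1 0)).isSome := by
    intro e he
    have h1 := (hpre e he).2.1
    have h2 := (hpre e he).2.2
    rw [hget0 _ (by rw [hRdef]; exact PySem.List.mem_pyRange_one.mpr ⟨h1, by omega⟩)]
    rfl
  have hget1 : ∀ k, d1.get? k =
      Option.map (fun st => ((boat2d.filter (fun e => PySem.List.pyGetD e 1 0 == k)).map
        (fun e => PySem.List.pyGetD e 0 0)).foldl stepEntry st) (d0.get? k) :=
    get?_foldl_stepA boat2d d0 hpres
  have hkeys1 : d1.keys = R := by rw [hd1, keys_foldl_stepA, hkeys0]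
  have hsome1 : ∀ j ∈ R, (d1.get? j).isSome := by
    intro j hj
    rw [hget1 j, hget0 j hj]
    rfl
  rw [hkeys1]
  have hget2 : ∀ k, (R.foldl finA d1).get? k =
      if k ∈ R then Option.map finEntry (d1.get? k) else d1.get? k :=
    get?_foldl_finA R d1 hndR hsome1
  have hnd2 : (R.foldl finA d1).keys.Nodup := by
    rw [keys_foldl_finA, hkeys1]; exact hndR
  rw [PySem.Dict.items_eq_map_keys (R.foldl finA d1) hnd2 []]
  rw [keys_foldl_finA, hkeys1]
  apply List.map_congr_left
  intro k hk
  have hL : (R.foldl finA d1).getD k [] =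
      finEntry (((boat2d.filter (fun e => PySem.List.pyGetD e 1 0 == k)).map
        (fun e => PySem.List.pyGetD e 0 0)).foldl stepEntry [0, 0, 0, 0]) := by
    have : (R.foldl finA d1).get? k =
        some (finEntry (((boat2d.filter (fun e => PySem.List.pyGetD e 1 0 == k)).map
          (fun e => PySem.List.pyGetD e 0 0)).foldl stepEntry [0, 0, 0, 0])) := by
      rw [hget2 k, if_pos hk, hget1 k, hget0 k hk]
      rfl
    rw [PySem.Dict.getD_eq_get?_getD, this]
    rfl
  rw [hL, groups_getD boat2d PySem.Dict.empty k, PySem.Dict.getD_empty, List.nil_append,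
    cardRun_eq]
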